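-- pv_equiv track=rewrite | github.com/MananSoni42/kaliteeri | utils.py | process_round
-- ===== SOURCE A (Python) =====
-- def points(card):
--     if card == 0:
--         return 0
--     if card%13 in [1,10,11,12,0]:
--         return 10
--     elif card%13 == 5:
--         return 5
--     elif card == 13+3:
--         return 30
--     return 0
--
-- def better(card1, card2, trump):
--     '''
--     returns True if card2 is better than card1
--     Assumes that card1 is played before card2
--     '''
--     card1 = int(card1)
--     card2 = int(card2)
--     trump = int(trump)
--     suit1 = 1 + (card1-1)//13
--     suit2 = 1 + (card2-1)//13
--     val1 = 1+(card1-1)%13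
--     val1 = 14 if val1 == 1 else val1
--     val2 = 1+(card2-1)%13
--     val2 = 14 if val2 == 1 else val2
--
--     if suit1 == suit2:
--         return val2 > val1
--     elif suit2 == trump:
--         return True
--     else:
--         return False
--
-- def process_round(offset, cards, trump):
--     n = len(cards)
--     p = 0
--     hcard,winner = cards[offset], offset
--     for i in range(n):
--         ind = (i+offset)%n
--         p += points(cards[ind])
--         if better(hcard, cards[ind], trump):
--             hcard = cards[ind]
--             winner = ind
--     return winner, p
-- ===== SOURCE B (Python) =====
-- def points(card):
--     if card == 0:
--         return 0
--     if card%13 in [1,10,11,12,0]: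
--         return 10
--     elif card%13 == 5:
--         return 5
--     elif card == 13+3:
--         return 30
--     return 0
--
-- def _suit(card):
--     return 1 + (card - 1) // 13
--
-- def _value(card):
--     v = 1 + (card - 1) % 13
--     return 14 if v == 1 else v
--
-- def process_round(offset, cards, trump):
--     n = len(cards)
--     lead = cards[offset]
--     p = sum(points(c) for c in cards)
--     order = [(offset, lead)] + [((i + offset) % n, cards[(i + offset) % n]) for i in range(1, n)]
--     trumps = [t for t in order if _suit(t[1]) == trump]
--     candidates = trumps if trumps else [t for t in order if _suit(t[1]) == _suit(lead)]
--     winner = max(candidates, key=lambda t: _value(t[1]))[0]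
--     return winner, p
-- ===== Notes on version B (the rewrite author's own statement) =====
-- stated objective: alternative
-- what changed: A finds the winner with a stateful duel loop (repeatedly calling better against the current best card); B computes the points total as an order-independent sum over the hand and picks the winner by filtering the play-order pairs to the trump cards (falling back to the lead-suit cards) and taking the first maximum by card value.
import Mathlib
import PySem

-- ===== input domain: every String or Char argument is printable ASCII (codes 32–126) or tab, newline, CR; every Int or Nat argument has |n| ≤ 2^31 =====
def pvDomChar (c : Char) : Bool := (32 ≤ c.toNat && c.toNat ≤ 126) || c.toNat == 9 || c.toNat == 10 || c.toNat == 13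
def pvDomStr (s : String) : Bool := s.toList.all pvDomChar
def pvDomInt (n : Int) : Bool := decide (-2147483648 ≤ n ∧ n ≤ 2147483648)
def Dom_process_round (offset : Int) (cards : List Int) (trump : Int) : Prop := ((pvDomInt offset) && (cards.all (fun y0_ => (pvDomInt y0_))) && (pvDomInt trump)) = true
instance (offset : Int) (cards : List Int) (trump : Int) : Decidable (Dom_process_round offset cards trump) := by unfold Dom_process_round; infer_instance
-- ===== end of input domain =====

-- B rewrites process_round as candidate filtering (trumps, else lead suit) plus a first-max
-- selection and an order-independent points sum, instead of A's stateful duel loop: alternative decomposition, same O(n) cost.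

-- ===== PORT A =====
def points (card : Int) : Int :=
  if card = 0 then 0
  else if PySem.Int.mod card 13 ∈ ([1, 10, 11, 12, 0] : List Int) then 10
  else if PySem.Int.mod card 13 = 5 then 5
  else if card = 13 + 3 then 30
  else 0

def better (card1 card2 trump : Int) : Bool :=
  let suit1 := 1 + PySem.Int.floordiv (card1 - 1) 13
  let suit2 := 1 + PySem.Int.floordiv (card2 - 1) 13
  let val1 := 1 + PySem.Int.mod (card1 - 1) 13
  let val1 := if val1 = 1 then 14 else val1
  let val2 := 1 + PySem.Int.mod (card2 - 1) 13
  let val2 := if val2 = 1 then 14 else val2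
  if suit1 = suit2 then decide (val2 > val1)
  else if suit2 = trump then true
  else false

def process_round (offset : Int) (cards : List Int) (trump : Int) : Int × Int :=
  let n : Int := cards.length
  match PySem.List.pyGet? cards offset with
  | none => (0, 0)  -- cards[offset] raises IndexError: outside Pre_
  | some h0 =>
    let r := (PySem.List.pyRange 0 n 1).foldl (fun st i =>
      let ind := PySem.Int.mod (i + offset) n
      let c := PySem.List.pyGetD cards ind 0   -- ind is always in range here
      let p := st.2.2 + points c
      if better st.1 c trump then (c, ind, p) else (st.1, st.2.1, p)) (h0, offset, 0)
    (r.2.1, r.2.2)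

-- ===== PORT B =====
def suitB (card : Int) : Int := 1 + PySem.Int.floordiv (card - 1) 13

def valB (card : Int) : Int :=
  let v := 1 + PySem.Int.mod (card - 1) 13
  if v = 1 then 14 else v

def process_round_alt (offset : Int) (cards : List Int) (trump : Int) : Int × Int :=
  let n : Int := cards.length
  match PySem.List.pyGet? cards offset with
  | none => (0, 0)  -- cards[offset] raises IndexError: outside Pre_
  | some lead =>
    let p := cards.foldl (fun acc c => acc + points c) 0
    let order := (offset, lead) :: (PySem.List.pyRange 1 n 1).map (fun i =>
        (PySem.Int.mod (i + offset) n, PySem.List.pyGetD cards (PySem.Int.mod (i + offset) n) 0))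
    let trumps := order.filter (fun t => decide (suitB t.2 = trump))
    let cand := if trumps.isEmpty then order.filter (fun t => decide (suitB t.2 = suitB lead)) else trumps
    match cand with
    | [] => (0, p)  -- unreachable: the lead pair always survives the fallback filter
    | t :: ts => ((ts.foldl (fun best u => if valB u.2 > valB best.2 then u else best) t).1, p)

-- ===== PRECONDITION & SPEC =====
-- Pre_ excludes exactly the inputs where A raises IndexError on cards[offset] (empty cards or offset out of [-len, len)); B raises there too.
def Pre_process_round (offset : Int) (cards : List Int) (trump : Int) : Prop :=
  PySem.Raise.InRange cards.length offset
instance (offset : Int) (cards : List Int) (trump : Int) : Decidable (Pre_process_round offset cards trump) := by unfold Pre_process_round; infer_instance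

def pvWitness_process_round : Int × List Int × Int := (1, [14, 5, 27], 2)

def Spec_process_round (offset : Int) (cards : List Int) (trump : Int) (out : Int × Int) : Prop := out = process_round_alt offset cards trump
instance (offset : Int) (cards : List Int) (trump : Int) (out : Int × Int) : Decidable (Spec_process_round offset cards trump out) := by unfold Spec_process_round; infer_instance

-- ===== CLAIM (what is proved, stated in full; the proofs are below) =====
def Claim_equal_process_round : Prop := ∀ (offset : Int) (cards : List Int) (trump : Int), Dom_process_round offset cards trump → Pre_process_round offset cards trump → Spec_process_round offset cards trump (process_round offset cards trump)

-- ===== LEMMAS AND PROOFS =====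

-- B's first-max selection step
def maxStep (best u : Int × Int) : Int × Int := if valB u.2 > valB best.2 then u else best

-- A's duel loop, abstracted over the (index, card) pairs in play order; state = (winner, hcard)
def loopA (trump : Int) : (Int × Int) → List (Int × Int) → Int × Int
  | st, [] => st
  | st, t :: l => if better st.2 t.2 trump then loopA trump t l else loopA trump st l

-- A's combined fold step over (index, card) pairs; state = (hcard, winner, points)
def stepF (trump : Int) (st : Int × Int × Int) (t : Int × Int) : Int × Int × Int :=
  if better st.1 t.2 trump then (t.2, t.1, st.2.2 + points t.2) else (st.1, st.2.1, st.2.2 + points t.2)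

def pairOf (cards : List Int) (offset n i : Int) : Int × Int :=
  (PySem.Int.mod (i + offset) n, PySem.List.pyGetD cards (PySem.Int.mod (i + offset) n) 0)

theorem better_eq (c1 c2 t : Int) :
    better c1 c2 t = (if suitB c1 = suitB c2 then decide (valB c2 > valB c1)
                      else if suitB c2 = t then true else false) := rfl

theorem better_self (c t : Int) : better c c t = false := by
  rw [better_eq]; simp

-- L1: once the current best card is a trump, the duel is a first-max over the trumps
theorem loopA_of_trump (trump : Int) (l : List (Int × Int)) (st : Int × Int)
    (h : suitB st.2 = trump) :
    loopA trump st l = (l.filter (fun t => decide (suitB t.2 = trump))).foldl maxStep st := by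
  induction l generalizing st with
  | nil => simp [loopA]
  | cons u l ih =>
    by_cases hu : suitB u.2 = trump
    · have hb : better st.2 u.2 trump = decide (valB u.2 > valB st.2) := by
        rw [better_eq, h, hu]; simp
      by_cases hv : valB u.2 > valB st.2
      · simp [loopA, hb, hv, List.filter_cons, hu, ih u hu, maxStep]
      · simp [loopA, hb, hv, List.filter_cons, hu, ih st h, maxStep]
    · have hb : better st.2 u.2 trump = false := by
        rw [better_eq]
        have hne : ¬ suitB st.2 = suitB u.2 := by rw [h]; exact fun e => hu e.symm
        simp [hne, hu]
      simp [loopA, hb, List.filter_cons, hu, ih st h]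

-- L2: while the best card is not a trump, the winner is the first-max trump if any trump
-- is played, else the first-max among cards of the best card's suit
theorem loopA_of_not_trump (trump : Int) (l : List (Int × Int)) (st : Int × Int)
    (h : ¬ suitB st.2 = trump) :
    loopA trump st l =
      (match l.filter (fun t => decide (suitB t.2 = trump)) with
       | [] => (l.filter (fun t => decide (suitB t.2 = suitB st.2))).foldl maxStep st
       | t :: ts => ts.foldl maxStep t) := by
  induction l generalizing st with
  | nil => simp [loopA]
  | cons u l ih =>
    by_cases hu : suitB u.2 = trump
    · have hb : better st.2 u.2 trump = true := by
        rw [better_eq]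
        have hne : ¬ suitB st.2 = suitB u.2 := by rw [hu] at *; exact h
        simp [hne, hu, h]
      simp [loopA, hb, List.filter_cons, hu, loopA_of_trump trump l u hu]
    · by_cases hs : suitB u.2 = suitB st.2
      · have hb : better st.2 u.2 trump = decide (valB u.2 > valB st.2) := by
          rw [better_eq, hs]; simp
        by_cases hv : valB u.2 > valB st.2
        · have ihu := ih u (by rw [hs]; exact h)
          rw [hs] at ihu
          simp [loopA, hb, hv, List.filter_cons, hu, hs, ihu, maxStep, h]
        · simp [loopA, hb, hv, List.filter_cons, hu, hs, ih st h, maxStep, h]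
      · have hb : better st.2 u.2 trump = false := by
          rw [better_eq]
          have hne : ¬ suitB st.2 = suitB u.2 := fun e => hs e.symm
          simp [hne, hu]
        have hs' : ¬ suitB u.2 = suitB st.2 := hs
        simp [loopA, hb, List.filter_cons, hu, hs', ih st h]

-- splitting A's combined fold into the duel loop and the points sum
theorem foldF_split (trump : Int) (l : List (Int × Int)) (h w p : Int) :
    l.foldl (stepF trump) (h, w, p) =
      ((loopA trump (w, h) l).2, (loopA trump (w, h) l).1,
       p + (l.map (fun t => points t.2)).sum) := by
  induction l generalizing h w p with
  | nil => simp [loopA]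
  | cons u l ih =>
    by_cases hb : better h u.2 trump = true
    · simp [stepF, loopA, hb, ih, add_assoc]
    · simp at hb
      simp [stepF, loopA, hb, ih, add_assoc]

theorem mod_small_shift (n a : Int) (hn : 0 < n) (h0 : 0 ≤ a) (h2 : a < 2 * n) :
    PySem.Int.mod a n = if a < n then a else a - n := by
  rw [PySem.Int.mod_eq_emod_of_pos hn]
  by_cases hlt : a < n
  · simp [hlt, Int.emod_eq_of_lt h0 hlt]
  · have : a = (a - n) + n * 1 := by ring
    rw [this, Int.add_mul_emod_self_left]
    have := Int.emod_eq_of_lt (a := a - n) (b := n) (by omega) (by omega)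
    simp [hlt, this]

theorem mod_add_mod (n i offset : Int) (hn : 0 < n) :
    PySem.Int.mod (i + offset) n = PySem.Int.mod (i + PySem.Int.mod offset n) n := by
  rw [PySem.Int.mod_eq_emod_of_pos hn, PySem.Int.mod_eq_emod_of_pos hn,
      PySem.Int.mod_eq_emod_of_pos hn]
  conv_lhs => rw [← Int.emod_add_ediv offset n]
  rw [← add_assoc, Int.add_mul_emod_self_left]

-- the play-order indices are a permutation of range(n)
theorem idx_perm (n offset : Int) (hn : 0 < n) :
    ((PySem.List.pyRange 0 n 1).map (fun i => PySem.Int.mod (i + offset) n)).Perm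
      (PySem.List.pyRange 0 n 1) := by
  rw [List.perm_ext_iff_of_nodup ?nd1 (PySem.List.nodup_pyRange_one 0 n)]
  case nd1 =>
    refine List.Nodup.map_on ?_ (PySem.List.nodup_pyRange_one 0 n)
    intro i hi j hj hij
    rw [PySem.List.mem_pyRange_one] at hi hj
    set o := PySem.Int.mod offset n with ho
    have hob : 0 ≤ o ∧ o < n := ⟨PySem.Int.mod_nonneg _ hn, PySem.Int.mod_lt _ hn⟩
    rw [mod_add_mod n i offset hn, mod_add_mod n j offset hn, ← ho] at hij
    rw [mod_small_shift n (i + o) hn (by omega) (by omega),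
        mod_small_shift n (j + o) hn (by omega) (by omega)] at hij
    split_ifs at hij <;> omega
  · intro x
    simp only [List.mem_map, PySem.List.mem_pyRange_one]
    constructor
    · rintro ⟨i, hi, rfl⟩
      exact ⟨PySem.Int.mod_nonneg _ hn, PySem.Int.mod_lt _ hn⟩
    · rintro ⟨hx0, hxn⟩
      refine ⟨PySem.Int.mod (x - offset) n,
        ⟨PySem.Int.mod_nonneg _ hn, PySem.Int.mod_lt _ hn⟩, ?_⟩
      rw [PySem.Int.mod_eq_emod_of_pos hn, PySem.Int.mod_eq_emod_of_pos hn,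
          Int.emod_add_emod, sub_add_cancel, Int.emod_eq_of_lt hx0 hxn]

-- the points total is order independent
theorem sum_rot (cards : List Int) (offset : Int) (f : Int → Int) (hn : 0 < (cards.length : Int)) :
    ((PySem.List.pyRange 0 (cards.length : Int) 1).map
        (fun i => f (PySem.List.pyGetD cards (PySem.Int.mod (i + offset) (cards.length : Int)) 0))).sum
      = (cards.map f).sum := by
  have h1 : ((PySem.List.pyRange 0 (cards.length : Int) 1).map
      (fun i => f (PySem.List.pyGetD cards (PySem.Int.mod (i + offset) (cards.length : Int)) 0)))
      = (((PySem.List.pyRange 0 (cards.length : Int) 1).map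
          (fun i => PySem.Int.mod (i + offset) (cards.length : Int))).map
          (fun j => f (PySem.List.pyGetD cards j 0))) := by
    rw [List.map_map]; rfl
  rw [h1]
  have hp := (idx_perm (cards.length : Int) offset hn).map (fun j => f (PySem.List.pyGetD cards j 0))
  rw [hp.sum_eq]
  have h2 : ((PySem.List.pyRange 0 (cards.length : Int) 1).map
      (fun j => f (PySem.List.pyGetD cards j 0)))
      = (((PySem.List.pyRange 0 (cards.length : Int) 1).map
          (fun j => PySem.List.pyGetD cards j 0)).map f) := by
    rw [List.map_map]; rfl
  rw [h2, PySem.List.map_pyGetD_pyRange_zero']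

theorem idx_wrap (cards : List Int) (offset : Int) (h : PySem.Raise.InRange cards.length offset) :
    PySem.List.pyGet? cards offset =
      some (PySem.List.pyGetD cards (PySem.Int.mod offset (cards.length : Int)) 0) := by
  have hb : -((cards.length : Int)) ≤ offset ∧ offset < (cards.length : Int) := by
    simpa [PySem.Raise.InRange] using h
  have hn : 0 < (cards.length : Int) := by omega
  by_cases h0 : 0 ≤ offset
  · rw [PySem.List.pyGet?_eq_some_getElem cards h0 (by omega),
        PySem.Int.mod_eq_emod_of_pos hn, Int.emod_eq_of_lt h0 (by omega),
        PySem.List.pyGetD_eq_getElem cards 0 h0 (by omega)]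
  · push_neg at h0
    have hmod : PySem.Int.mod offset (cards.length : Int) = (cards.length : Int) + offset := by
      rw [PySem.Int.mod_eq_emod_of_pos hn]
      have h2 : ((cards.length : Int) + offset + (cards.length : Int) * (-1)) % (cards.length : Int)
          = ((cards.length : Int) + offset) % (cards.length : Int) :=
        Int.add_mul_emod_self_left ((cards.length : Int) + offset) (cards.length : Int) (-1)
      have h3 : offset % ((cards.length : Int)) = ((cards.length : Int) + offset) % (cards.length : Int) := by
        conv_rhs => rw [← h2]
        congr 1
        ring
      rw [h3, Int.emod_eq_of_lt (by omega) (by omega)]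
    rw [hmod, show offset = -(((-offset).toNat : Nat) : Int) by omega,
        PySem.List.pyGet?_neg_natCast cards (-offset).toNat (by omega) (by omega),
        PySem.List.pyGetD_eq_getElem cards 0 (by omega) (by omega),
        List.getElem?_eq_getElem (by omega)]
    have hAB : ((cards.length : Int) + -(((-offset).toNat : Nat) : Int)).toNat
        = cards.length - (-offset).toNat := by omega
    simp only [hAB]

theorem pairOf_eq (cards : List Int) (offset n : Int) :
    (fun i => (PySem.Int.mod (i + offset) n,
        PySem.List.pyGetD cards (PySem.Int.mod (i + offset) n) 0)) = pairOf cards offset n := rfl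

theorem maxStep_eq :
    (fun (best u : Int × Int) => if valB u.2 > valB best.2 then u else best) = maxStep := rfl

theorem foldA_eq (cards : List Int) (offset n trump : Int) (l : List Int) (init : Int × Int × Int) :
    l.foldl (fun st i =>
        let ind := PySem.Int.mod (i + offset) n
        let c := PySem.List.pyGetD cards ind 0
        let p := st.2.2 + points c
        if better st.1 c trump then (c, ind, p) else (st.1, st.2.1, p)) init
      = (l.map (pairOf cards offset n)).foldl (stepF trump) init := by
  rw [List.foldl_map]
  rfl

-- A's result, characterised via the duel loop over the play-order pairs
theorem a_char (offset : Int) (cards : List Int) (trump : Int)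
    (h : PySem.Raise.InRange cards.length offset) :
    process_round offset cards trump =
      ((loopA trump (offset, PySem.List.pyGetD cards (PySem.Int.mod offset (cards.length : Int)) 0)
          ((PySem.List.pyRange 1 (cards.length : Int) 1).map (pairOf cards offset (cards.length : Int)))).1,
       (cards.map points).sum) := by
  have hb : -((cards.length : Int)) ≤ offset ∧ offset < (cards.length : Int) := by
    simpa [PySem.Raise.InRange] using h
  have hn : 0 < (cards.length : Int) := by omega
  have hget := idx_wrap cards offset h
  have hcons : PySem.List.pyRange 0 (cards.length : Int) 1
      = 0 :: PySem.List.pyRange 1 (cards.length : Int) 1 := by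
    rw [PySem.List.pyRange_one_cons hn]; norm_num
  simp only [process_round, hget, foldA_eq]
  rw [hcons, List.map_cons, foldF_split]
  simp only [zero_add]
  have hdrop : loopA trump
      (offset, PySem.List.pyGetD cards (PySem.Int.mod offset (cards.length : Int)) 0)
      (pairOf cards offset (cards.length : Int) 0 ::
        (PySem.List.pyRange 1 (cards.length : Int) 1).map (pairOf cards offset (cards.length : Int)))
      = loopA trump
      (offset, PySem.List.pyGetD cards (PySem.Int.mod offset (cards.length : Int)) 0)
      ((PySem.List.pyRange 1 (cards.length : Int) 1).map (pairOf cards offset (cards.length : Int))) := by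
    simp [pairOf, loopA, better_self]
  have hsum : (List.map (fun t => points t.2)
      (pairOf cards offset (cards.length : Int) 0 ::
        (PySem.List.pyRange 1 (cards.length : Int) 1).map (pairOf cards offset (cards.length : Int)))).sum
      = (cards.map points).sum := by
    rw [← List.map_cons, ← hcons, List.map_map]
    exact sum_rot cards offset points hn
  rw [hdrop, hsum]

-- B's result, characterised the same way
theorem alt_char (offset : Int) (cards : List Int) (trump lead : Int)
    (hget : PySem.List.pyGet? cards offset = some lead) :
    process_round_alt offset cards trump =
      ((loopA trump (offset, lead)
          ((PySem.List.pyRange 1 (cards.length : Int) 1).map (pairOf cards offset (cards.length : Int)))).1,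
       (cards.map points).sum) := by
  simp only [process_round_alt, hget, pairOf_eq, maxStep_eq, PySem.List.foldl_add, zero_add]
  set rest := (PySem.List.pyRange 1 (cards.length : Int) 1).map (pairOf cards offset (cards.length : Int)) with hrest
  by_cases ht : suitB lead = trump
  · rw [loopA_of_trump trump rest (offset, lead) ht]
    simp [List.filter_cons, ht]
  · rw [loopA_of_not_trump trump rest (offset, lead) ht]
    cases hfil : rest.filter (fun t => decide (suitB t.2 = trump)) with
    | nil => simp [List.filter_cons, ht, hfil]
    | cons t ts => simp [List.filter_cons, ht, hfil]

theorem main_eq (offset : Int) (cards : List Int) (trump : Int)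
    (h : PySem.Raise.InRange cards.length offset) :
    process_round offset cards trump = process_round_alt offset cards trump := by
  have hget := idx_wrap cards offset h
  rw [a_char offset cards trump h, alt_char offset cards trump _ hget]

-- ===== VERDICT (by name: the statement is the Claim_ definition above) =====
theorem process_round_spec : Claim_equal_process_round := by
  intro offset cards trump _ hpre
  exact main_eq offset cards trump hpre
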